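-- pv_equiv track=rewrite | github.com/JakeyKakey/jak30_mmp | bin/tax/TaxTree.py | fixLineage
-- ===== SOURCE A (Python) =====
-- def fixLineage(taxonomy_list):
--
--     # So, this is doing a lot of obtuse looking direct array operations, but there's a reason for that.
--     #
--     # The list holds lists of two so taxonomy_list[0] will contain another list with
--     # ["Candidatus Iainarchaeum andersonii","Name"], which should make some of what is happening more obvious.
--     #
--     # A ranked lineage may look like this:
--     # Candidatus Iainarchaeum andersonii|	|Candidatus Iainarchaeum|	|	|	|Candidatus Diapherotrites|	|Archaea|
--     #
--     # This corresponds to Name|Species|Genus|Family|Order|Class|Phylum|Kingdom|Superkingdom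
--     # Species is empty which means Candidatus needs to be moved up there as it *is* the species.
--     # This is so you can still have subspecies like Homo Neanderthalis > Homo Sapien, without a specific sub-species rank.
--     #
--     # There's data missing in Family, Order, Class, Kingdom which means this lineage just doesn't belong to a specific
--     # subset and these need to be removed from the chain.
--
--     name = taxonomy_list[0] # take out the Name
--     remaining_lineage = taxonomy_list[1:9] # keep Species to Superkingdom here.
--
--     last_empty = []
--     to_remove = []
--
--     # Moving up name.
--     for item in remaining_lineage:
--         if item[1] == ' ':
--             last_empty = item
--             to_remove.append(item)
--         else:
--             break
--
--     # Removing all the gaps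
--     for item in remaining_lineage:
--         if item[1] == ' ':
--             to_remove.append(item)
--     remaining_lineage = [x for x in remaining_lineage if x not in to_remove]
--
--     #Associate the name with the last empty rank, and put that rank and name back onto the lineage.
--
--     if len(last_empty) == 0:                # Strangely enough if not last_empty doesn't work, but this just puts
--         remaining_lineage.insert(0, name)   # the name back at the beginning if there was nothing to move up
--     else:
--         last_empty[1] = name[1]
--         remaining_lineage.insert(0, last_empty)
--         remaining_lineage.insert(0, name)
--
--     return remaining_lineage
-- ===== SOURCE B (Python) =====
-- def fixLineage(taxonomy_list):
--     # Single recursive pass over the lineage: one traversal simultaneously finds the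
--     # last leading-empty rank and builds the cleaned tail back-to-front.
--     def go(items, leading):
--         # returns (last leading-empty sublist or None, cleaned remainder)
--         if not items:
--             return None, []
--         head = items[0]
--         if head[1] == ' ':
--             le, kept = go(items[1:], leading)
--             if leading and le is None:
--                 le = head
--             return (le if leading else None), kept
--         else:
--             _, kept = go(items[1:], False)
--             return None, [head] + kept
--
--     name = taxonomy_list[0]
--     last_empty, kept = go(taxonomy_list[1:9], True)
--     if last_empty is None:
--         return [name] + kept
--     last_empty[1] = name[1]
--     return [name, last_empty] + kept
-- ===== Notes on version B (the rewrite author's own statement) =====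
-- stated objective: alternative
-- what changed: Replaces A's three staged passes (leading-run loop, a second full scan building a to_remove list, and an O(n^2) membership filter plus front inserts) with a single recursive traversal that builds the cleaned tail back-to-front while simultaneously determining the last leading-empty rank via a leading flag threaded through the recursion.
import Mathlib
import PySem

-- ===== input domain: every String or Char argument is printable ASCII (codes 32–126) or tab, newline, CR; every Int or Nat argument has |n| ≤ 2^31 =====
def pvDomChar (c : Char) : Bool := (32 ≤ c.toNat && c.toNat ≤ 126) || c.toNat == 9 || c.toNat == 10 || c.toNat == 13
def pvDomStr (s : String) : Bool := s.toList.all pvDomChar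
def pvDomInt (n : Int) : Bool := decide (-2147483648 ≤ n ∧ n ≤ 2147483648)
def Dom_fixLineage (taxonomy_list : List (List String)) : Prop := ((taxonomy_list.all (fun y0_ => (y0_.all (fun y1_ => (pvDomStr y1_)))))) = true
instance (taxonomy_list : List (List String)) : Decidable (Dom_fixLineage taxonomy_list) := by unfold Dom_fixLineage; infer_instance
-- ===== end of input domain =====

-- B replaces A's three staged passes (leading-run loop, to_remove list, membership filter + inserts)
-- with one recursive traversal that builds the cleaned tail back-to-front while finding the last
-- leading-empty rank; equivalence is about the return value (both Pythons perform the same in-place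
-- mutation of that one sublist).

-- ===== PORT A =====
-- first loop of A: walks the leading run of items with item[1] == ' ',
-- carrying (last_empty, to_remove)
def fixLineageLoop1 : List (List String) → List String → List (List String) → List String × List (List String)
  | [], le, tr => (le, tr)
  | item :: xs, le, tr =>
    if PySem.List.pyGetD item 1 "" == " " then
      fixLineageLoop1 xs item (tr ++ [item])
    else (le, tr)

def fixLineage (taxonomy_list : List (List String)) : List (List String) :=
  match taxonomy_list with
  | [] => []   -- unreached under Pre_ (Python raises IndexError)
  | name :: rest =>
    let remaining := rest.take 8
    let p := fixLineageLoop1 remaining [] []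
    let last_empty := p.1
    -- second loop: append every empty-rank item to to_remove
    let to_remove := remaining.foldl
      (fun tr item => if PySem.List.pyGetD item 1 "" == " " then tr ++ [item] else tr) p.2
    -- membership-based filter
    let remaining2 := remaining.filter (fun x => !(to_remove.contains x))
    if last_empty.length = 0 then
      name :: remaining2
    else
      name :: (last_empty.set 1 (PySem.List.pyGetD name 1 "")) :: remaining2

-- ===== PORT B =====
-- B's recursive helper go(items, leading): one pass, returns
-- (last leading-empty sublist or None, cleaned remainder built back-to-front)
def fixLineageGo : List (List String) → Bool → Option (List String) × List (List String)
  | [], _ => (none, [])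
  | head :: t, leading =>
    if PySem.List.pyGetD head 1 "" == " " then
      let p := fixLineageGo t leading
      let le := if leading && p.1.isNone then some head else p.1
      (if leading then le else none, p.2)
    else
      let p := fixLineageGo t false
      (none, head :: p.2)

def fixLineage_alt (taxonomy_list : List (List String)) : List (List String) :=
  match taxonomy_list with
  | [] => []   -- unreached under Pre_
  | name :: rest =>
    let p := fixLineageGo (rest.take 8) true
    match p.1 with
    | none => name :: p.2
    | some last_empty => name :: (last_empty.set 1 (PySem.List.pyGetD name 1 "")) :: p.2

-- ===== PRECONDITION & SPEC =====
-- Pre_ excludes exactly the inputs where Python A raises IndexError: an empty list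
-- (taxonomy_list[0]), a rank item of length < 2 in taxonomy_list[1:9] (item[1]),
-- and a name of length < 2 when the first rank is empty (name[1] is then read).
def Pre_fixLineage (taxonomy_list : List (List String)) : Prop :=
  taxonomy_list ≠ [] ∧
  (∀ x ∈ (taxonomy_list.drop 1).take 8, 2 ≤ x.length) ∧
  ((((taxonomy_list.drop 1).take 8).headD []).getD 1 "" = " " → 2 ≤ (taxonomy_list.headD []).length)
instance (taxonomy_list : List (List String)) : Decidable (Pre_fixLineage taxonomy_list) := by
  unfold Pre_fixLineage; infer_instance

def pvWitness_fixLineage : List (List String) :=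
  [["Candidatus Iainarchaeum andersonii", "Name"],
   ["", " "], ["Candidatus Iainarchaeum", "Genus"], ["", " "], ["Archaea", "Superkingdom"]]

def Spec_fixLineage (taxonomy_list : List (List String)) (out : List (List String)) : Prop := out = fixLineage_alt taxonomy_list
instance (taxonomy_list : List (List String)) (out : List (List String)) : Decidable (Spec_fixLineage taxonomy_list out) := by unfold Spec_fixLineage; infer_instance

-- ===== CLAIM (what is proved, stated in full; the proofs are below) =====
def Claim_equal_fixLineage : Prop := ∀ (taxonomy_list : List (List String)), Dom_fixLineage taxonomy_list → Pre_fixLineage taxonomy_list → Spec_fixLineage taxonomy_list (fixLineage taxonomy_list)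

-- ===== LEMMAS AND PROOFS =====

-- characterisation of A's first loop via takeWhile
theorem fixLineageLoop1_eq (l : List (List String)) :
    ∀ le tr, fixLineageLoop1 l le tr =
      ((l.takeWhile (fun x => PySem.List.pyGetD x 1 "" == " ")).getLastD le,
       tr ++ l.takeWhile (fun x => PySem.List.pyGetD x 1 "" == " ")) := by
  induction l with
  | nil => intro le tr; simp [fixLineageLoop1]
  | cons x xs ih =>
    intro le tr
    by_cases h : (PySem.List.pyGetD x 1 "" == " ") = true
    · simp [fixLineageLoop1, h, ih, List.getLast?_cons,
        List.getLastD_eq_getLast?]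
    · have h' : (PySem.List.pyGetD x 1 "" == " ") = false := by simpa using h
      simp [fixLineageLoop1, h', List.takeWhile_cons_of_neg]

-- the membership-based filter equals the plain predicate filter
theorem filter_not_contains_eq (p : List String → Bool) (l tw : List (List String))
    (htw : ∀ x ∈ tw, p x = true) :
    l.filter (fun x => !((tw ++ l.filter p).contains x))
      = l.filter (fun x => !(p x)) := by
  apply List.filter_congr
  intro x hx
  by_cases h : p x = true
  · have : x ∈ tw ++ l.filter p := by
      simp [List.mem_filter, hx, h]
    simp [this, h]
  · have : x ∉ tw ++ l.filter p := by
      intro hmem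
      rcases List.mem_append.mp hmem with hmem | hmem
      · exact h (htw x hmem)
      · exact h (List.mem_filter.mp hmem).2
    simp [this, h]

-- B's pass with leading = false: drops empties, keeps the rest, never reports a last empty
theorem fixLineageGo_false (l : List (List String)) :
    fixLineageGo l false = (none, l.filter (fun x => !(PySem.List.pyGetD x 1 "" == " "))) := by
  induction l with
  | nil => rfl
  | cons x xs ih =>
    by_cases h : (PySem.List.pyGetD x 1 "" == " ") = true
    · simp [fixLineageGo, h, ih]
    · have h' : (PySem.List.pyGetD x 1 "" == " ") = false := by simpa using h
      simp [fixLineageGo, h', ih]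

-- B's pass with leading = true: last leading empty = last of the takeWhile run, tail filtered
theorem fixLineageGo_true (l : List (List String)) :
    fixLineageGo l true =
      ((l.takeWhile (fun x => PySem.List.pyGetD x 1 "" == " ")).getLast?,
       l.filter (fun x => !(PySem.List.pyGetD x 1 "" == " "))) := by
  induction l with
  | nil => rfl
  | cons x xs ih =>
    by_cases h : (PySem.List.pyGetD x 1 "" == " ") = true
    · simp only [fixLineageGo, h, if_pos, ih]
      have : (List.takeWhile (fun x => PySem.List.pyGetD x 1 "" == " ") (x :: xs))
          = x :: List.takeWhile (fun x => PySem.List.pyGetD x 1 "" == " ") xs := by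
        simp [List.takeWhile_cons_of_pos, h]
      rw [this]
      cases htw : (List.takeWhile (fun x => PySem.List.pyGetD x 1 "" == " ") xs).getLast? with
      | none =>
        have : List.takeWhile (fun x => PySem.List.pyGetD x 1 "" == " ") xs = [] :=
          List.getLast?_eq_none_iff.mp htw
        simp [this, h]
      | some y =>
        have hne : List.takeWhile (fun x => PySem.List.pyGetD x 1 "" == " ") xs ≠ [] := by
          intro hc; rw [hc] at htw; simp at htw
        simp [List.getLast?_cons, htw, h]
    · have h' : (PySem.List.pyGetD x 1 "" == " ") = false := by simpa using h
      simp [fixLineageGo, h', fixLineageGo_false, List.takeWhile_cons_of_neg]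

-- an element of the run has " " at index 1, so it is nonempty
theorem run_elem_len (x : List String) (h : (PySem.List.pyGetD x 1 "" == " ") = true) :
    x.length ≠ 0 := by
  intro hlen
  rw [List.length_eq_zero_iff] at hlen
  subst hlen
  simp [PySem.List.pyGetD, PySem.List.pyGet?, PySem.List.pyIdx?] at h

-- ===== VERDICT (by name: the statement is the Claim_ definition above) =====
theorem fixLineage_spec : Claim_equal_fixLineage := by
  intro l _ _
  unfold Spec_fixLineage
  match l with
  | [] => rfl
  | name :: rest =>
    simp only [fixLineage, fixLineage_alt]
    rw [fixLineageLoop1_eq]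
    simp only [PySem.List.foldl_append_if_eq_filter, List.nil_append]
    rw [filter_not_contains_eq (fun x => PySem.List.pyGetD x 1 "" == " ") (rest.take 8)
          (List.takeWhile (fun x => PySem.List.pyGetD x 1 "" == " ") (rest.take 8))
          (fun x hx => List.mem_takeWhile_imp (p := fun x => PySem.List.pyGetD x 1 "" == " ") hx),
        fixLineageGo_true]
    cases htw : (List.takeWhile (fun x => PySem.List.pyGetD x 1 "" == " ") (rest.take 8)).getLast? with
    | none =>
      have hnil : List.takeWhile (fun x => PySem.List.pyGetD x 1 "" == " ") (rest.take 8) = [] :=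
        List.getLast?_eq_none_iff.mp htw
      simp [hnil]
    | some x =>
      have hne : List.takeWhile (fun x => PySem.List.pyGetD x 1 "" == " ") (rest.take 8) ≠ [] := by
        intro hc; rw [hc] at htw; simp at htw
      have hmem : x ∈ List.takeWhile (fun x => PySem.List.pyGetD x 1 "" == " ") (rest.take 8) :=
        List.mem_of_getLast? htw
      have hxlen : x.length ≠ 0 :=
        run_elem_len x (List.mem_takeWhile_imp (p := fun x => PySem.List.pyGetD x 1 "" == " ") hmem)
      have hx : x ≠ [] := by
        intro hc; exact hxlen (by simp [hc])
      simp [htw, hx]
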